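-- pv_equiv track=rewrite | github.com/SteadBytes/algorithms-comp-sci | graphs/breadth-first-search/bfs.py | bfs
-- ===== SOURCE A (Python) =====
-- from collections import deque
--
-- def bfs(graph, source):
--     """ Performs a breadth-first search on a graph
--
--     Args:
--         graph (list of list of int): Adjacency matrix representation of graph
--         source (int): Index of source vertex to begin search from
--
--     Returns:
--         list of dicts describing each vertex -> [{distance: _, predecessor: _ }]
--     """
--     vertexInfo = []
--     for i in range(len(graph)):
--         vertexInfo.append({"distance": None, "predecessor": None})
--     vertexInfo[source]["distance"] = 0
--
--     search_queue = deque()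
--     search_queue.append(source)
--
--     while search_queue:
--         u = search_queue.popleft()
--         for v in graph[u]:
--             if vertexInfo[v]["distance"] is None:
--                 vertexInfo[v]["distance"] = vertexInfo[u]["distance"] + 1
--                 vertexInfo[v]["predecessor"] = u
--                 search_queue.append(v)
--     return vertexInfo
-- ===== SOURCE B (Python) =====
-- def bfs(graph, source):
--     """Level-synchronous BFS: expand whole frontiers with an explicit level
--     counter instead of a deque carrying per-vertex distance lookups."""
--     vertexInfo = [{"distance": None, "predecessor": None} for _ in graph]
--     vertexInfo[source]["distance"] = 0
--
--     frontier = [source]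
--     d = 0
--     while frontier:
--         next_frontier = []
--         for u in frontier:
--             for v in graph[u]:
--                 if vertexInfo[v]["distance"] is None:
--                     vertexInfo[v]["distance"] = d + 1
--                     vertexInfo[v]["predecessor"] = u
--                     next_frontier.append(v)
--         frontier = next_frontier
--         d += 1
--     return vertexInfo
-- ===== Notes on version B (the rewrite author's own statement) =====
-- stated objective: alternative
-- what changed: Replaced the deque-driven BFS (one queue, distance of u re-read from vertexInfo inside the inner loop) by a level-synchronous BFS that expands whole frontiers: two alternating frontier lists and an explicit integer level counter d, writing distance d+1 directly.
import Mathlib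
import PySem

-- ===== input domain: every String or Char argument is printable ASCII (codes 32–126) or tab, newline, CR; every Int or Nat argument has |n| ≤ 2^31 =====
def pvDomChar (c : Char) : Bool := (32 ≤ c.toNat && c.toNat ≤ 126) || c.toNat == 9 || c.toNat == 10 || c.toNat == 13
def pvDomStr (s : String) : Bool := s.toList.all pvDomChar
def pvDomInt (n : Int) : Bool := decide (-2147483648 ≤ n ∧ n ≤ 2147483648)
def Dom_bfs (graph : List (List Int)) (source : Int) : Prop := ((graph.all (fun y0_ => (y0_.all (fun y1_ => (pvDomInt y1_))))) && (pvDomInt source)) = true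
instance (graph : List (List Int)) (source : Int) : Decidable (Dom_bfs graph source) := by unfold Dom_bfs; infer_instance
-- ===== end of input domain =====

-- B re-implements A's deque-based BFS as a level-synchronous BFS (two alternating
-- frontier lists with an explicit level counter, instead of one deque with a
-- per-vertex distance lookup); same return value, alternative decomposition.

-- ===== PORT A =====
-- Shared low-level helpers: transliterations of the Python cell dict
-- {"distance": _, "predecessor": _} and of the reads/writes vertexInfo[v][k]
-- that BOTH Python programs perform verbatim.
def pvCell : List (String × Option Int) := [("distance", none), ("predecessor", none)]

def pvDGet (c : List (String × Option Int)) (k : String) : Option (Option Int) :=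
  PySem.Dict.get? (PySem.Dict.mk c) k

def pvDSet (c : List (String × Option Int)) (k : String) (x : Option Int) : List (String × Option Int) :=
  (PySem.Dict.insert (PySem.Dict.mk c) k x).items

-- vertexInfo[v][k]  (none = IndexError on the list; excluded by Pre_)
def pvGetField (info : List (List (String × Option Int))) (v : Int) (k : String) : Option (Option Int) :=
  match PySem.List.pyGet? info v with
  | some c => pvDGet c k
  | none => none

-- vertexInfo[v][k] = x  (an out-of-range v leaves info unchanged; Python raises
-- IndexError there — excluded by Pre_)
def pvSetField (info : List (List (String × Option Int))) (v : Int) (k : String) (x : Option Int) :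
    List (List (String × Option Int)) :=
  PySem.List.pySetD info v (pvDSet ((PySem.List.pyGet? info v).getD pvCell) k x)

-- number of cells whose "distance" is still None (termination measure only)
def pvNoneCount (info : List (List (String × Option Int))) : Nat :=
  info.countP (fun c => pvDGet c "distance" == (some none : Option (Option Int)))

-- body of A's inner `for v in graph[u]` loop
def pvStepA (u : Int) (st : List (List (String × Option Int)) × List Int) (v : Int) :
    List (List (String × Option Int)) × List Int :=
  match pvGetField st.1 v "distance" with
  | some none =>
    -- vertexInfo[u]["distance"] + 1; the `.getD 0` default is unreachable under Pre_
    -- (Python would raise there)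
    let du : Int := ((pvGetField st.1 u "distance").join).getD 0
    let info1 := pvSetField st.1 v "distance" (some (du + 1))
    let info2 := pvSetField info1 v "predecessor" (some u)
    (info2, st.2 ++ [v])
  | _ => st

def pvM (st : List (List (String × Option Int)) × List Int) : Nat :=
  pvNoneCount st.1 + st.2.length

-- termination lemmas for the two loops (cited in their decreasing_by)

theorem pvIdx_lt {n : Nat} {i : Int} {m : Nat} (h : PySem.List.pyIdx? n i = some m) : m < n := by
  unfold PySem.List.pyIdx? at h
  split_ifs at h with h1 h2 h3 <;> simp_all <;> omega

theorem pvDGet_pvDSet_self (c : List (String × Option Int)) (k : String) (x : Option Int) :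
    pvDGet (pvDSet c k x) k = some x :=
  PySem.Dict.get?_insert_self (PySem.Dict.mk c) k x

theorem pvDGet_pvDSet_ne (c : List (String × Option Int)) (k k' : String) (x : Option Int)
    (h : k' ≠ k) : pvDGet (pvDSet c k x) k' = pvDGet c k' :=
  PySem.Dict.get?_insert_of_ne (PySem.Dict.mk c) x h

theorem pvGetField_of_idx {info : List (List (String × Option Int))} {w : Int} {m : Nat}
    (h : PySem.List.pyIdx? info.length w = some m) (k : String) :
    pvGetField info w k = pvDGet (info.getD m pvCell) k := by
  have hm : m < info.length := pvIdx_lt h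
  simp [pvGetField, PySem.List.pyGet?, h, List.getD_eq_getElem?_getD,
    List.getElem?_eq_getElem hm]

theorem pvGetField_of_idx_none {info : List (List (String × Option Int))} {w : Int}
    (h : PySem.List.pyIdx? info.length w = none) (k : String) :
    pvGetField info w k = none := by
  simp [pvGetField, PySem.List.pyGet?, h]

theorem pvSetField_of_idx {info : List (List (String × Option Int))} {w : Int} {m : Nat}
    (h : PySem.List.pyIdx? info.length w = some m) (k : String) (x : Option Int) :
    pvSetField info w k x = info.set m (pvDSet (info.getD m pvCell) k x) := by
  have hm : m < info.length := pvIdx_lt h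
  simp [pvSetField, PySem.List.pySetD, PySem.List.pySet?, PySem.List.pyGet?, h,
    List.getElem?_eq_getElem hm, List.getD_eq_getElem?_getD]

theorem pvSetSet_noneCount (info : List (List (String × Option Int))) (v : Int)
    (h : pvGetField info v "distance" = some none) (x : Int) (p : Option Int) :
    pvNoneCount (pvSetField (pvSetField info v "distance" (some x)) v "predecessor" p) < pvNoneCount info := by
  cases hidx : PySem.List.pyIdx? info.length v with
  | none => rw [pvGetField_of_idx_none hidx] at h; exact absurd h (by simp)
  | some m =>
    have hm : m < info.length := pvIdx_lt hidx
    have hget : pvDGet (info.getD m pvCell) "distance" = some none := by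
      rw [pvGetField_of_idx hidx] at h; exact h
    have hgd : info.getD m pvCell = info[m] := by
      rw [List.getD_eq_getElem?_getD, List.getElem?_eq_getElem hm]; rfl
    set c1 := pvDSet (info.getD m pvCell) "distance" (some x) with hc1
    rw [pvSetField_of_idx hidx]
    have hlen : (info.set m c1).length = info.length := by simp
    have hidx2 : PySem.List.pyIdx? (info.set m c1).length v = some m := by rw [hlen]; exact hidx
    rw [pvSetField_of_idx hidx2]
    have hgd2 : (info.set m c1).getD m pvCell = c1 := by
      rw [List.getD_eq_getElem?_getD, List.getElem?_set_self (by simpa using hm)]; rfl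
    rw [hgd2, List.set_set]
    set c2 := pvDSet c1 "predecessor" p with hc2
    have hpredm : (pvDGet info[m] "distance" == (some none : Option (Option Int))) = true := by
      rw [← hgd, hget]; rfl
    have hpredc2 : (pvDGet c2 "distance" == (some none : Option (Option Int))) = false := by
      have hx : pvDGet c2 "distance" = some (some x) := by
        rw [hc2, pvDGet_pvDSet_ne _ _ _ _ (by decide), hc1, pvDGet_pvDSet_self]
      rw [hx]; rfl
    have hpos : 0 < pvNoneCount info :=
      List.countP_pos_iff.mpr ⟨info[m], info.getElem_mem hm, hpredm⟩
    unfold pvNoneCount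
    rw [List.countP_set hm]
    simp only [hpredm, hpredc2]
    simp
    exact ⟨info[m], info.getElem_mem hm, by simpa using hpredm⟩

theorem pvStepA_measure (u : Int) (st : List (List (String × Option Int)) × List Int) (v : Int) :
    pvM (pvStepA u st v) ≤ pvM st := by
  unfold pvStepA
  split
  next h =>
    have := pvSetSet_noneCount st.1 v h (((pvGetField st.1 u "distance").join).getD 0 + 1) (some u)
    simp [pvM]
    omega
  next => exact le_refl _

theorem pvFoldA_measure (row : List Int) (u : Int) (st : List (List (String × Option Int)) × List Int) :
    pvM (row.foldl (pvStepA u) st) ≤ pvM st := by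
  induction row generalizing st with
  | nil => exact le_refl _
  | cons v row ih => exact le_trans (ih (pvStepA u st v)) (pvStepA_measure u st v)

def pvLoopA (graph : List (List Int)) (info : List (List (String × Option Int))) (q : List Int) :
    List (List (String × Option Int)) :=
  match q with
  | [] => info
  | u :: q' =>
    let st := ((PySem.List.pyGet? graph u).getD []).foldl (pvStepA u) (info, q')
    pvLoopA graph st.1 st.2
termination_by pvNoneCount info + q.length
decreasing_by
  have h := pvFoldA_measure ((PySem.List.pyGet? graph u).getD []) u (info, q')
  simp only [pvM] at h
  simp only [List.length_cons]
  omega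

def bfs (graph : List (List Int)) (source : Int) : List (List (String × Option Int)) :=
  let info0 := (PySem.List.pyRange 0 (PySem.List.len graph) 1).foldl (fun acc _ => acc ++ [pvCell]) []
  let info1 := pvSetField info0 source "distance" (some 0)
  pvLoopA graph info1 [source]

-- ===== PORT B =====
-- body of B's inner `for v in graph[u]` loop: the written distance is the explicit
-- level counter d+1, not a lookup of u's recorded distance
def pvStepB (u : Int) (dnew : Int) (st : List (List (String × Option Int)) × List Int) (v : Int) :
    List (List (String × Option Int)) × List Int :=
  match pvGetField st.1 v "distance" with
  | some none =>
    (pvSetField (pvSetField st.1 v "distance" (some dnew)) v "predecessor" (some u), st.2 ++ [v])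
  | _ => st

-- body of B's `for u in frontier` loop
def pvOuterB (graph : List (List Int)) (dnew : Int) (st : List (List (String × Option Int)) × List Int)
    (u : Int) : List (List (String × Option Int)) × List Int :=
  ((PySem.List.pyGet? graph u).getD []).foldl (pvStepB u dnew) st

theorem pvStepB_measure (u dnew : Int) (st : List (List (String × Option Int)) × List Int) (v : Int) :
    pvM (pvStepB u dnew st v) ≤ pvM st := by
  unfold pvStepB
  split
  next h =>
    have := pvSetSet_noneCount st.1 v h dnew (some u)
    simp [pvM]
    omega
  next => exact le_refl _

theorem pvFoldB_measure (row : List Int) (u dnew : Int)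
    (st : List (List (String × Option Int)) × List Int) :
    pvM (row.foldl (pvStepB u dnew) st) ≤ pvM st := by
  induction row generalizing st with
  | nil => exact le_refl _
  | cons v row ih => exact le_trans (ih (pvStepB u dnew st v)) (pvStepB_measure u dnew st v)

theorem pvFoldOuterB_measure (graph : List (List Int)) (f : List Int) (dnew : Int)
    (st : List (List (String × Option Int)) × List Int) :
    pvM (f.foldl (pvOuterB graph dnew) st) ≤ pvM st := by
  induction f generalizing st with
  | nil => exact le_refl _
  | cons u f ih =>
    exact le_trans (ih (pvOuterB graph dnew st u))
      (pvFoldB_measure ((PySem.List.pyGet? graph u).getD []) u dnew st)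

def pvLoopB (graph : List (List Int)) (info : List (List (String × Option Int)))
    (frontier : List Int) (d : Int) : List (List (String × Option Int)) :=
  if hf : frontier = [] then info
  else
    let st := frontier.foldl (pvOuterB graph (d + 1)) (info, [])
    pvLoopB graph st.1 st.2 (d + 1)
termination_by pvNoneCount info + frontier.length
decreasing_by
  have h := pvFoldOuterB_measure graph frontier (d + 1) (info, [])
  simp only [pvM, List.length_nil] at h
  simp only [List.foldl_attach]
  have : 0 < frontier.length := List.length_pos_iff.mpr hf
  omega

def bfs_alt (graph : List (List Int)) (source : Int) : List (List (String × Option Int)) :=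
  let info0 := graph.map (fun _ => pvCell)
  let info1 := pvSetField info0 source "distance" (some 0)
  pvLoopB graph info1 [source] 0

-- ===== PRECONDITION & SPEC =====
-- Pre_ excludes the inputs on which Python A raises IndexError: a source index
-- outside [-len(graph), len(graph)), and any adjacency entry outside that range.
-- A raises on an out-of-range entry exactly when it is reachable from the source,
-- which is not a closed-form condition; Pre_ conservatively requires ALL entries in
-- range, so it also excludes some graphs whose out-of-range entries are unreachable,
-- on which A returns and B returns the same value.
def Pre_bfs (graph : List (List Int)) (source : Int) : Prop :=
  (-(graph.length : Int) ≤ source ∧ source < (graph.length : Int)) ∧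
  ∀ row ∈ graph, ∀ v ∈ row, -(graph.length : Int) ≤ v ∧ v < (graph.length : Int)

instance (graph : List (List Int)) (source : Int) : Decidable (Pre_bfs graph source) := by
  unfold Pre_bfs; infer_instance

def pvWitness_bfs : List (List Int) × Int := ([[1], [0, 1]], 0)

def Spec_bfs (graph : List (List Int)) (source : Int) (out : List (List (String × Option Int))) : Prop :=
  out = bfs_alt graph source
instance (graph : List (List Int)) (source : Int) (out : List (List (String × Option Int))) :
    Decidable (Spec_bfs graph source out) := by unfold Spec_bfs; infer_instance

-- ===== CLAIM (what is proved, stated in full; the proofs are below) =====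
def Claim_equal_bfs : Prop := ∀ (graph : List (List Int)) (source : Int),
  Dom_bfs graph source → Pre_bfs graph source → Spec_bfs graph source (bfs graph source)

-- ===== LEMMAS AND PROOFS =====
-- "vertex w currently has recorded distance y"
def pvDistEq (info : List (List (String × Option Int))) (w : Int) (y : Int) : Prop :=
  pvGetField info w "distance" = some (some y)

-- a visited (some-distance) vertex is untouched by the two writes that mark v
theorem pvStable_pair {info : List (List (String × Option Int))} {v w : Int} {y : Int}
    (hv : pvGetField info v "distance" = some none) (x : Int) (p : Option Int)
    (hw : pvDistEq info w y) :
    pvDistEq (pvSetField (pvSetField info v "distance" (some x)) v "predecessor" p) w y := by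
  cases hidxv : PySem.List.pyIdx? info.length v with
  | none => rw [pvGetField_of_idx_none hidxv] at hv; exact absurd hv (by simp)
  | some mv =>
    cases hidxw : PySem.List.pyIdx? info.length w with
    | none => unfold pvDistEq at hw; rw [pvGetField_of_idx_none hidxw] at hw; exact absurd hw (by simp)
    | some mw =>
      have hmv : mv < info.length := pvIdx_lt hidxv
      have hne : mw ≠ mv := by
        intro he
        unfold pvDistEq at hw
        rw [pvGetField_of_idx hidxw] at hw
        rw [pvGetField_of_idx hidxv] at hv
        rw [he] at hw
        rw [hv] at hw
        exact absurd hw (by simp)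
      set c1 := pvDSet (info.getD mv pvCell) "distance" (some x) with hc1
      rw [pvSetField_of_idx hidxv]
      have hlen : (info.set mv c1).length = info.length := by simp
      have hidxv2 : PySem.List.pyIdx? (info.set mv c1).length v = some mv := by rw [hlen]; exact hidxv
      rw [pvSetField_of_idx hidxv2]
      rw [List.set_set]
      set c2 := pvDSet ((info.set mv c1).getD mv pvCell) "predecessor" p with hc2
      unfold pvDistEq
      have hlen2 : (info.set mv c2).length = info.length := by simp
      have hidxw2 : PySem.List.pyIdx? (info.set mv c2).length w = some mw := by rw [hlen2]; exact hidxw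
      rw [pvGetField_of_idx hidxw2]
      have hgd : (info.set mv c2).getD mw pvCell = info.getD mw pvCell := by
        rw [List.getD_eq_getElem?_getD, List.getElem?_set_ne (by omega), ← List.getD_eq_getElem?_getD]
      rw [hgd]
      unfold pvDistEq at hw
      rw [pvGetField_of_idx hidxw] at hw
      exact hw

-- the two writes give v itself recorded distance x
theorem pvSet_self_dist {info : List (List (String × Option Int))} {v : Int}
    (hv : pvGetField info v "distance" = some none) (x : Int) (p : Option Int) :
    pvDistEq (pvSetField (pvSetField info v "distance" (some x)) v "predecessor" p) v x := by
  cases hidxv : PySem.List.pyIdx? info.length v with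
  | none => rw [pvGetField_of_idx_none hidxv] at hv; exact absurd hv (by simp)
  | some mv =>
    have hmv : mv < info.length := pvIdx_lt hidxv
    set c1 := pvDSet (info.getD mv pvCell) "distance" (some x) with hc1
    rw [pvSetField_of_idx hidxv]
    have hlen : (info.set mv c1).length = info.length := by simp
    have hidxv2 : PySem.List.pyIdx? (info.set mv c1).length v = some mv := by rw [hlen]; exact hidxv
    rw [pvSetField_of_idx hidxv2]
    have hgd1 : (info.set mv c1).getD mv pvCell = c1 := by
      rw [List.getD_eq_getElem?_getD, List.getElem?_set_self (by simpa using hmv)]; rfl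
    rw [List.set_set]
    set c2 := pvDSet ((info.set mv c1).getD mv pvCell) "predecessor" p with hc2
    unfold pvDistEq
    have hlen2 : (info.set mv c2).length = info.length := by simp
    have hidxv3 : PySem.List.pyIdx? (info.set mv c2).length v = some mv := by rw [hlen2]; exact hidxv
    rw [pvGetField_of_idx hidxv3]
    have hgd2 : (info.set mv c2).getD mv pvCell = c2 := by
      rw [List.getD_eq_getElem?_getD, List.getElem?_set_self (by simpa using hmv)]; rfl
    rw [hgd2, hc2, pvDGet_pvDSet_ne _ _ _ _ (by decide), hgd1, hc1, pvDGet_pvDSet_self]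

theorem pvStable_stepB {u dnew : Int} {st : List (List (String × Option Int)) × List Int} {v : Int}
    {w y : Int} (hw : pvDistEq st.1 w y) : pvDistEq (pvStepB u dnew st v).1 w y := by
  unfold pvStepB
  split
  next h => exact pvStable_pair h dnew (some u) hw
  next => exact hw

theorem pvStable_foldB {row : List Int} {u dnew : Int}
    {st : List (List (String × Option Int)) × List Int} {w y : Int}
    (hw : pvDistEq st.1 w y) : pvDistEq (row.foldl (pvStepB u dnew) st).1 w y := by
  induction row generalizing st with
  | nil => exact hw
  | cons v row ih => exact ih (pvStable_stepB hw)

-- with u's recorded distance = d, A's inner step equals B's inner step at level d+1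
theorem pvStep_eq {u d : Int} {st : List (List (String × Option Int)) × List Int} (v : Int)
    (hu : pvDistEq st.1 u d) : pvStepA u st v = pvStepB u (d + 1) st v := by
  unfold pvStepA pvStepB
  split
  next h =>
    unfold pvDistEq at hu
    rw [hu]
    rfl
  next => rfl

theorem pvScan_eq (row : List Int) (u d : Int) (st : List (List (String × Option Int)) × List Int)
    (hu : pvDistEq st.1 u d) :
    row.foldl (pvStepA u) st = row.foldl (pvStepB u (d + 1)) st := by
  induction row generalizing st with
  | nil => rfl
  | cons v row ih =>
    simp only [List.foldl_cons]
    rw [pvStep_eq v hu]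
    exact ih _ (pvStable_stepB hu)

theorem pvStepB_acc (u dnew : Int) (info : List (List (String × Option Int))) (q : List Int)
    (v : Int) :
    pvStepB u dnew (info, q) v =
      ((pvStepB u dnew (info, []) v).1, q ++ (pvStepB u dnew (info, []) v).2) := by
  unfold pvStepB
  cases h : pvGetField info v "distance" with
  | none => simp
  | some o => cases o with
    | none => simp
    | some y => simp

-- the queue component is append-only: folding from accumulator q appends the same tail
theorem pvFoldB_acc (row : List Int) (u dnew : Int) (info : List (List (String × Option Int)))
    (q : List Int) :
    row.foldl (pvStepB u dnew) (info, q) =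
      ((row.foldl (pvStepB u dnew) (info, [])).1,
        q ++ (row.foldl (pvStepB u dnew) (info, [])).2) := by
  induction row generalizing info q with
  | nil => simp
  | cons v row ih =>
    simp only [List.foldl_cons]
    rw [pvStepB_acc u dnew info q v]
    rw [ih (pvStepB u dnew (info, []) v).1 (q ++ (pvStepB u dnew (info, []) v).2)]
    rw [ih (pvStepB u dnew (info, []) v).1 (pvStepB u dnew (info, []) v).2]
    simp

-- every vertex the inner fold appends ends up with recorded distance dnew
theorem pvFoldB_new (row : List Int) (u dnew : Int)
    (st : List (List (String × Option Int)) × List Int) :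
    ∀ v ∈ (row.foldl (pvStepB u dnew) st).2,
      v ∈ st.2 ∨ pvDistEq (row.foldl (pvStepB u dnew) st).1 v dnew := by
  induction row generalizing st with
  | nil => intro v hv; exact Or.inl hv
  | cons w row ih =>
    intro v hv
    simp only [List.foldl_cons] at hv ⊢
    rcases ih (pvStepB u dnew st w) v hv with h | h
    · unfold pvStepB at h
      split at h
      next hg =>
        simp only [List.mem_append, List.mem_singleton] at h
        rcases h with h | h
        · exact Or.inl h
        · subst h
          refine Or.inr ?_
          exact pvStable_foldB (st := pvStepB u dnew st v)
            (by unfold pvStepB; rw [hg]; exact pvSet_self_dist hg dnew (some u))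
      next => exact Or.inl h
    · exact Or.inr h

-- main simulation: A's queue is always (remaining current level) ++ (next level so far)
theorem pvSim (graph : List (List Int)) :
    ∀ (N : Nat) (info : List (List (String × Option Int))) (f g : List Int) (d : Int),
      2 * (pvNoneCount info + f.length + g.length) + (if f = [] then 1 else 0) ≤ N →
      (∀ u ∈ f, pvDistEq info u d) → (∀ u ∈ g, pvDistEq info u (d + 1)) →
      pvLoopA graph info (f ++ g) =
        pvLoopB graph (f.foldl (pvOuterB graph (d + 1)) (info, g)).1
          (f.foldl (pvOuterB graph (d + 1)) (info, g)).2 (d + 1) := by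
  intro N
  induction N with
  | zero =>
    intro info f g d hb hf hg
    exfalso
    cases f with
    | nil => simp at hb
    | cons u f' => simp at hb
  | succ N ih =>
    intro info f g d hb hf hg
    cases f with
    | nil =>
      simp only [List.foldl_nil, List.nil_append]
      by_cases hgnil : g = []
      · subst hgnil
        rw [pvLoopB]
        simp [pvLoopA]
      · rw [pvLoopB]
        simp only [hgnil, dite_false]
        have hbound : 2 * (pvNoneCount info + g.length + ([] : List Int).length)
            + (if (g : List Int) = [] then 1 else 0) ≤ N := by
          rw [if_neg hgnil]
          simp only [List.length_nil] at hb ⊢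
          simp at hb
          omega
        have h2 := ih info g [] (d + 1) hbound hg (by intro u hu; exact absurd hu (List.not_mem_nil))
        rw [List.append_nil] at h2
        rw [h2]
    | cons u f' =>
      have hu : pvDistEq info u d := hf u List.mem_cons_self
      rw [List.cons_append, pvLoopA]
      rw [pvScan_eq _ u d _ hu]
      rw [pvFoldB_acc]
      set row := (PySem.List.pyGet? graph u).getD [] with hrow
      set iB := (row.foldl (pvStepB u (d + 1)) (info, [])).1 with hiB
      set adds := (row.foldl (pvStepB u (d + 1)) (info, [])).2 with hadds
      -- RHS: unfold the outer fold one step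
      rw [List.foldl_cons]
      have houter : pvOuterB graph (d + 1) (info, g) u = (iB, g ++ adds) := by
        unfold pvOuterB
        rw [← hrow, pvFoldB_acc, ← hiB, ← hadds]
      rw [houter]
      -- invariants for the recursive call
      have hmeas := pvFoldB_measure row u (d + 1) (info, [])
      simp only [pvM, List.length_nil, ← hiB, ← hadds] at hmeas
      have hf' : ∀ w ∈ f', pvDistEq iB w d := by
        intro w hw
        exact pvStable_foldB (hf w (List.mem_cons_of_mem u hw))
      have hg' : ∀ w ∈ g ++ adds, pvDistEq iB w (d + 1) := by
        intro w hw
        rcases List.mem_append.mp hw with hw | hw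
        · exact pvStable_foldB (hg w hw)
        · rcases pvFoldB_new row u (d + 1) (info, []) w (by rw [hadds] at hw; exact hw) with h | h
          · exact absurd h (List.not_mem_nil)
          · rw [← hiB] at h; exact h
      have hbound : 2 * (pvNoneCount iB + f'.length + (g ++ adds).length)
          + (if f' = [] then 1 else 0) ≤ N := by
        have : (if f' = [] then 1 else 0) ≤ 1 := by split <;> omega
        simp only [List.length_append, List.length_cons] at hb ⊢
        simp only [if_neg (List.cons_ne_nil u f')] at hb
        omega
      have h2 := ih iB f' (g ++ adds) d hbound hf' hg'
      rw [List.append_assoc]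
      exact h2

theorem pvInitA (n : Nat) :
    (PySem.List.pyRange 0 (n : Int) 1).foldl (fun acc _ => acc ++ [pvCell]) [] =
      List.replicate n pvCell := by
  rw [PySem.List.foldl_append_singleton_eq_map (fun _ => pvCell)]
  rw [List.map_const']
  simp [PySem.List.pyRange_zero_natCast]

theorem pvIdx_isSome {n : Nat} {i : Int} (h1 : -(n : Int) ≤ i) (h2 : i < (n : Int)) :
    ∃ m, PySem.List.pyIdx? n i = some m := by
  unfold PySem.List.pyIdx?
  split_ifs
  · exact ⟨_, rfl⟩
  · exact ⟨_, rfl⟩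

theorem bfs_eq_alt (graph : List (List Int)) (source : Int) (hpre : Pre_bfs graph source) :
    bfs graph source = bfs_alt graph source := by
  obtain ⟨⟨h1, h2⟩, -⟩ := hpre
  unfold bfs bfs_alt
  simp only [PySem.List.len_eq, pvInitA, List.map_const']
  set n := graph.length with hn
  set info0 := List.replicate n pvCell with hinfo0
  set info1 := pvSetField info0 source "distance" (some 0) with hinfo1
  obtain ⟨m, hm⟩ := pvIdx_isSome h1 h2
  have hlen0 : info0.length = n := by simp [hinfo0]
  have hmn : m < n := pvIdx_lt hm
  have hidx0 : PySem.List.pyIdx? info0.length source = some m := by rw [hlen0]; exact hm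
  have hgd0 : info0.getD m pvCell = pvCell := by
    rw [hinfo0, List.getD_eq_getElem?_getD, List.getElem?_replicate]
    split <;> rfl
  have hset : info1 = info0.set m (pvDSet pvCell "distance" (some 0)) := by
    rw [hinfo1, pvSetField_of_idx hidx0, hgd0]
  have hsrc : pvDistEq info1 source 0 := by
    have hlen1 : info1.length = n := by rw [hset]; simp [hlen0]
    have hidx1 : PySem.List.pyIdx? info1.length source = some m := by rw [hlen1]; exact hm
    unfold pvDistEq
    rw [pvGetField_of_idx hidx1]
    have : info1.getD m pvCell = pvDSet pvCell "distance" (some 0) := by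
      rw [hset, List.getD_eq_getElem?_getD, List.getElem?_set_self (by simpa [hlen0] using hmn)]; rfl
    rw [this]
    decide
  -- run the simulation from the one-element frontier [source] at level 0
  have hs := pvSim graph (2 * (pvNoneCount info1 + 1)) info1 [source] [] 0
    (by simp) (by intro w hw; rw [List.mem_singleton] at hw; subst hw; exact hsrc)
    (by intro w hw; exact absurd hw (List.not_mem_nil))
  rw [List.append_nil] at hs
  rw [hs]
  conv_rhs => rw [pvLoopB]
  rw [dif_neg (List.cons_ne_nil source [])]

-- ===== VERDICT (by name: the statement is the Claim_ definition above) =====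
theorem bfs_spec : Claim_equal_bfs := by
  intro graph source _hdom hpre
  unfold Spec_bfs
  exact bfs_eq_alt graph source hpre
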